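-- pv_equiv track=rewrite | github.com/persalteas/biorseo | Isaure_benchmark.py | compare_two_contacts
-- ===== SOURCE A (Python) =====
-- def compare_two_contacts(true_ctc, prediction):
--     tp = 0
--     fp = 0
--     tn = 0
--     fn = 0
--     for i in range(len(true_ctc)):
--         if true_ctc[i] == '*' and prediction[i] == '*':
--             tp += 1
--         elif true_ctc[i] == '.' and prediction[i] == '.':
--             tn += 1
--         elif true_ctc[i] == '.' and prediction[i] == '*':
--             fp += 1
--         elif true_ctc[i] == '*' and prediction[i] == '.':
--             fn += 1
--     return [tp, tn, fp, fn]
-- ===== SOURCE B (Python) =====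
-- def compare_two_contacts(true_ctc, prediction):
--     pairs = [(c, prediction[i]) for i, c in enumerate(true_ctc) if c in '*.']
--     return [pairs.count(('*', '*')),
--             pairs.count(('.', '.')),
--             pairs.count(('.', '*')),
--             pairs.count(('*', '.'))]
-- ===== Notes on version B (the rewrite author's own statement) =====
-- stated objective: idiomatic
-- what changed: Replaces the four-counter if/elif scan with a tabulate-then-query decomposition: one comprehension collects the (true,predicted) pairs at contact-relevant positions, and the four categories are read off with list.count.
import Mathlib
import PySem

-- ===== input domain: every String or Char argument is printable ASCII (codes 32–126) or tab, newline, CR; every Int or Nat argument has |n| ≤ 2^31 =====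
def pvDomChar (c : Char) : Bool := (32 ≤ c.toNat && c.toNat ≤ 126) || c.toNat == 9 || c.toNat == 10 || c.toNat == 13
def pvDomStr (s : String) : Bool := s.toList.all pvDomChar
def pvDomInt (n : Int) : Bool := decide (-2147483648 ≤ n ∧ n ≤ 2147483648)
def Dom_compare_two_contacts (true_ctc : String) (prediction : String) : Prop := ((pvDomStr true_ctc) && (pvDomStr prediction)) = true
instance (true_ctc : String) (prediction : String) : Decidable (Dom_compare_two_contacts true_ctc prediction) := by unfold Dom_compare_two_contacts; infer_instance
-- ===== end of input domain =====

-- B tabulates the (true,predicted) character pairs once and reads the four categories off by counting — idiomatic, no if/elif chain.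
-- ===== PORT A =====
-- for i in range(len(true_ctc)) with the four-branch if/elif chain over a quadruple (tp, tn, fp, fn).
-- prediction[i] is read through pyGetD with a junk default ' ': under Pre_ the index is in range whenever
-- the branch tests it, and ' ' makes every branch false exactly where Python short-circuits past prediction[i].
def compare_two_contacts (true_ctc : String) (prediction : String) : List Int :=
  let ts := true_ctc.toList
  let ps := prediction.toList
  let st := (PySem.List.pyRange 0 (ts.length : Int) 1).foldl
    (fun (s : Int × Int × Int × Int) i =>
      let tc := PySem.List.pyGetD ts i ' '
      let pc := PySem.List.pyGetD ps i ' '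
      if tc = '*' ∧ pc = '*' then (s.1 + 1, s.2.1, s.2.2.1, s.2.2.2)
      else if tc = '.' ∧ pc = '.' then (s.1, s.2.1 + 1, s.2.2.1, s.2.2.2)
      else if tc = '.' ∧ pc = '*' then (s.1, s.2.1, s.2.2.1 + 1, s.2.2.2)
      else if tc = '*' ∧ pc = '.' then (s.1, s.2.1, s.2.2.1, s.2.2.2 + 1)
      else s) (0, 0, 0, 0)
  [st.1, st.2.1, st.2.2.1, st.2.2.2]

-- ===== PORT B =====
-- pairs = [(c, prediction[i]) for i, c in enumerate(true_ctc) if c in '*.'] ; then four list.count queries.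
def compare_two_contacts_alt (true_ctc : String) (prediction : String) : List Int :=
  let ps := prediction.toList
  let pairs := (PySem.List.enumerate true_ctc.toList 0).filterMap
    (fun ic => if ic.2 = '*' ∨ ic.2 = '.' then some (ic.2, PySem.List.pyGetD ps ic.1 ' ') else none)
  [(pairs.count ('*', '*') : Int), (pairs.count ('.', '.') : Int),
   (pairs.count ('.', '*') : Int), (pairs.count ('*', '.') : Int)]

-- ===== PRECONDITION & SPEC =====
-- Pre_ excludes exactly the inputs on which A raises IndexError: a position of true_ctc holding '*' or '.'
-- with no corresponding position in prediction.
def Pre_compare_two_contacts (true_ctc : String) (prediction : String) : Prop :=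
  ∀ i ∈ List.range true_ctc.toList.length,
    (true_ctc.toList.getD i ' ' = '*' ∨ true_ctc.toList.getD i ' ' = '.') → i < prediction.toList.length
instance (true_ctc : String) (prediction : String) : Decidable (Pre_compare_two_contacts true_ctc prediction) := by unfold Pre_compare_two_contacts; infer_instance

def pvWitness_compare_two_contacts : String × String := ("*.x*", "**.*")

def Spec_compare_two_contacts (true_ctc : String) (prediction : String) (out : List Int) : Prop := out = compare_two_contacts_alt true_ctc prediction
instance (true_ctc : String) (prediction : String) (out : List Int) : Decidable (Spec_compare_two_contacts true_ctc prediction out) := by unfold Spec_compare_two_contacts; infer_instance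

-- ===== CLAIM (what is proved, stated in full; the proofs are below) =====
def Claim_equal_compare_two_contacts : Prop := ∀ (true_ctc : String) (prediction : String), Dom_compare_two_contacts true_ctc prediction → Pre_compare_two_contacts true_ctc prediction → Spec_compare_two_contacts true_ctc prediction (compare_two_contacts true_ctc prediction)

-- ===== LEMMAS AND PROOFS =====

-- A's fold state after the whole range, characterised as four countP's over List.range.
theorem foldA_counts (ts ps : List Char) (n : Nat) :
    ((PySem.List.pyRange 0 (n : Int) 1).foldl
      (fun (s : Int × Int × Int × Int) i =>
        let tc := PySem.List.pyGetD ts i ' '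
        let pc := PySem.List.pyGetD ps i ' '
        if tc = '*' ∧ pc = '*' then (s.1 + 1, s.2.1, s.2.2.1, s.2.2.2)
        else if tc = '.' ∧ pc = '.' then (s.1, s.2.1 + 1, s.2.2.1, s.2.2.2)
        else if tc = '.' ∧ pc = '*' then (s.1, s.2.1, s.2.2.1 + 1, s.2.2.2)
        else if tc = '*' ∧ pc = '.' then (s.1, s.2.1, s.2.2.1, s.2.2.2 + 1)
        else s) (0, 0, 0, 0)) =
    (((List.range n).countP (fun k => ts.getD k ' ' = '*' ∧ PySem.List.pyGetD ps (k : Int) ' ' = '*') : Int),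
     ((List.range n).countP (fun k => ts.getD k ' ' = '.' ∧ PySem.List.pyGetD ps (k : Int) ' ' = '.') : Int),
     ((List.range n).countP (fun k => ts.getD k ' ' = '.' ∧ PySem.List.pyGetD ps (k : Int) ' ' = '*') : Int),
     ((List.range n).countP (fun k => ts.getD k ' ' = '*' ∧ PySem.List.pyGetD ps (k : Int) ' ' = '.') : Int)) := by
  induction n with
  | zero => simp [PySem.List.pyRange]
  | succ n ih =>
    rw [show ((n+1 : Nat) : Int) = (n : Int) + 1 by push_cast; ring,
        PySem.List.pyRange_one_succ_right (by positivity), List.foldl_append, ih,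
        List.range_succ, List.countP_append]
    simp only [List.foldl_cons, List.foldl_nil, List.countP_cons, List.countP_nil]
    have hget : PySem.List.pyGetD ts (n : Int) ' ' = ts.getD n ' ' := by
      simp [PySem.List.pyGetD_natCast]
    split_ifs with h1 h2 h3 h4 <;> simp_all [Prod.ext_iff]

-- B's pair count for a key whose first component x is '*' or '.', as a countP over List.range.
theorem pairs_count (ts ps : List Char) (x y : Char) (hx : x = '*' ∨ x = '.') :
    (((PySem.List.enumerate ts 0).filterMap
        (fun ic => if ic.2 = '*' ∨ ic.2 = '.' then some (ic.2, PySem.List.pyGetD ps ic.1 ' ') else none)).count (x, y)) =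
    (List.range ts.length).countP (fun k => ts.getD k ' ' = x ∧ PySem.List.pyGetD ps (k : Int) ' ' = y) := by
  induction ts using List.reverseRecOn with
  | nil => simp [PySem.List.enumerate]
  | append_singleton ts c ih =>
    have hcong : (List.range ts.length).countP
        (fun k => decide ((ts ++ [c]).getD k ' ' = x ∧ PySem.List.pyGetD ps (k : Int) ' ' = y)) =
        (List.range ts.length).countP
        (fun k => decide (ts.getD k ' ' = x ∧ PySem.List.pyGetD ps (k : Int) ' ' = y)) := by
      refine List.countP_congr (fun k hk => ?_)
      simp only [List.mem_range] at hk
      rw [List.getD_eq_getElem?_getD, List.getD_eq_getElem?_getD, List.getElem?_append_left hk]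
    have hlast : (ts ++ [c]).getD ts.length ' ' = c := by simp
    rw [PySem.List.enumerate_append, List.filterMap_append, List.count_append, ih,
        List.length_append, List.length_cons, List.length_nil, List.range_succ,
        List.countP_append, hcong]
    congr 1
    simp only [PySem.List.enumerate_cons, PySem.List.enumerate_nil, List.filterMap_cons,
      List.filterMap_nil, List.countP_cons, List.countP_nil, hlast, zero_add]
    by_cases hc : c = '*' ∨ c = '.'
    · rw [if_pos hc]
      by_cases hxc : c = x
      · subst hxc
        by_cases hy : PySem.List.pyGetD ps (ts.length : Int) ' ' = y <;>
          simp [List.count_cons, hy, Prod.ext_iff]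
      · have hno : ¬(c = x ∧ PySem.List.pyGetD ps (ts.length : Int) ' ' = y) := fun h => hxc h.1
        simp [Prod.ext_iff, hxc]
    · rw [if_neg hc]
      have hxc : ¬ c = x := by rintro rfl; exact hc hx
      simp [hxc]

-- ===== VERDICT (by name: the statement is the Claim_ definition above) =====
theorem compare_two_contacts_spec : Claim_equal_compare_two_contacts := by
  intro t p _ _
  unfold Spec_compare_two_contacts compare_two_contacts compare_two_contacts_alt
  simp only [foldA_counts,
    pairs_count t.toList p.toList '*' '*' (Or.inl rfl),
    pairs_count t.toList p.toList '.' '.' (Or.inr rfl),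
    pairs_count t.toList p.toList '.' '*' (Or.inr rfl),
    pairs_count t.toList p.toList '*' '.' (Or.inl rfl)]
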